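-- pv_equiv track=rewrite | github.com/kfirsalo/New-Graph-ZSL | graph_ZSL_generic.py | label_edges_classes_ordered
-- ===== SOURCE A (Python) =====
-- def label_edges_classes_ordered(edge_data):
--     """
--     Make a dict of classes and their labels_edges they belong to. For every label_edge
--     there is only one class it belongs to.
--     :return: a dict of classes and their labels_edges
--     """
--     dict_class_label_edge = {}
--     for edge in edge_data:
--         if edge[0][0] == 'c':
--             edge = [edge[1], edge[0]]
--         #     label = edge[0]
--         # else:
--         #     label = edge[1]
--         label = edge[1]
--         if dict_class_label_edge.get(label) is not None:
--             edges = dict_class_label_edge[label]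
--             edges.append(edge)
--             dict_class_label_edge[label] = edges
--         else:
--             dict_class_label_edge.update({label: [edge]})
--     return dict_class_label_edge
-- ===== SOURCE B (Python) =====
-- def label_edges_classes_ordered(edge_data):
--     """
--     Make a dict of classes and their labels_edges they belong to. For every label_edge
--     there is only one class it belongs to.
--     :return: a dict of classes and their labels_edges
--     """
--     norm = [[e[1], e[0]] if e[0][0] == 'c' else e for e in edge_data]
--     labels = dict.fromkeys(e[1] for e in norm)
--     return {lab: [e for e in norm if e[1] == lab] for lab in labels}
-- ===== Notes on version B (the rewrite author's own statement) =====
-- stated objective: simpler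
-- what changed: Replaces the incremental dict get/append/reinsert loop by normalize-once, dedup the labels in first-occurrence order (dict.fromkeys), then a dict comprehension that collects each label's edges with a filter.
import Mathlib
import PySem

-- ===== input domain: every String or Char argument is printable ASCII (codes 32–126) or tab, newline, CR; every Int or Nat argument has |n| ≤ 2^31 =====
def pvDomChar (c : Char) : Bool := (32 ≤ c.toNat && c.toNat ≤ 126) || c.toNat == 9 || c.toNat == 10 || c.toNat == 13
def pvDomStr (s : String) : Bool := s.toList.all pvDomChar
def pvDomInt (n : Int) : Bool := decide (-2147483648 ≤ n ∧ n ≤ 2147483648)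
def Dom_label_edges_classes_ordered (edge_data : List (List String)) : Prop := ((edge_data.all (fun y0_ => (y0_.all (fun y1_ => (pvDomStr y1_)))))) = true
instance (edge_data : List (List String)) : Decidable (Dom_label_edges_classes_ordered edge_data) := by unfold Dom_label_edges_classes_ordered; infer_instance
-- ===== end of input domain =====

-- B groups edges by class with normalize-once + ordered label dedup + per-label filter, instead of A's
-- incremental get/append/reinsert dict loop; equivalence of the RETURN value is what is proved.

-- ===== PORT A =====
-- shared helper: the edge normalisation both Pythons perform (swap when edge[0] starts with 'c')
def pvNorm (edge : List String) : List String :=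
  if PySem.Str.pyGet? (PySem.List.pyGetD edge 0 "") 0 = some 'c' then
    [PySem.List.pyGetD edge 1 "", PySem.List.pyGetD edge 0 ""]
  else edge

def label_edges_classes_ordered (edge_data : List (List String)) : List (String × List (List String)) :=
  (edge_data.foldl (fun d edge =>
      let edge := pvNorm edge
      let label := PySem.List.pyGetD edge 1 ""
      match d.get? label with
      | some edges => d.insert label (edges ++ [edge])
      | none => d.insert label [edge])
    (PySem.Dict.empty : PySem.Dict String (List (List String)))).items

-- ===== PORT B =====
def label_edges_classes_ordered_alt (edge_data : List (List String)) : List (String × List (List String)) :=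
  let norm := edge_data.map pvNorm
  (PySem.List.dedup (norm.map (fun e => PySem.List.pyGetD e 1 ""))).map
    (fun lab => (lab, norm.filter (fun e => PySem.List.pyGetD e 1 "" == lab)))

-- ===== PRECONDITION & SPEC =====
-- Pre_ excludes exactly the edges on which the Python raises IndexError: an edge shorter than 2
-- (edge[1] / the swap) or whose first element is the empty string (edge[0][0]).
def Pre_label_edges_classes_ordered (edge_data : List (List String)) : Prop :=
  ∀ e ∈ edge_data, 2 ≤ e.length ∧ e.getD 0 "" ≠ ""
instance (edge_data : List (List String)) : Decidable (Pre_label_edges_classes_ordered edge_data) := by unfold Pre_label_edges_classes_ordered; infer_instance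
def pvWitness_label_edges_classes_ordered : List (List String) := [["a", "c1"], ["c2", "b"], ["b", "c1"]]

def Spec_label_edges_classes_ordered (edge_data : List (List String)) (out : List (String × List (List String))) : Prop := out = label_edges_classes_ordered_alt edge_data
instance (edge_data : List (List String)) (out : List (String × List (List String))) : Decidable (Spec_label_edges_classes_ordered edge_data out) := by unfold Spec_label_edges_classes_ordered; infer_instance

-- ===== CLAIM (what is proved, stated in full; the proofs are below) =====
def Claim_equal_label_edges_classes_ordered : Prop := ∀ (edge_data : List (List String)), Dom_label_edges_classes_ordered edge_data → Pre_label_edges_classes_ordered edge_data → Spec_label_edges_classes_ordered edge_data (label_edges_classes_ordered edge_data)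

-- ===== LEMMAS AND PROOFS =====
def pvLab (edge : List String) : String := PySem.List.pyGetD (pvNorm edge) 1 ""

def pvStep (d : PySem.Dict String (List (List String))) (e : List String) :
    PySem.Dict String (List (List String)) :=
  d.insert (pvLab e) (d.getD (pvLab e) [] ++ [pvNorm e])

theorem pvStep_eq (d : PySem.Dict String (List (List String))) (e : List String) :
    (let edge := pvNorm e
     let label := PySem.List.pyGetD edge 1 ""
     match d.get? label with
     | some edges => d.insert label (edges ++ [edge])
     | none => d.insert label [edge]) = pvStep d e := by
  show (match d.get? (pvLab e) with
        | some edges => d.insert (pvLab e) (edges ++ [pvNorm e])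
        | none => d.insert (pvLab e) [pvNorm e]) = pvStep d e
  cases h : d.get? (pvLab e) with
  | none =>
    rw [pvStep, PySem.Dict.getD_of_get?_eq_none d [] h]
    rfl
  | some edges => rw [pvStep, PySem.Dict.getD_of_get?_eq_some d [] h]

theorem pvA_eq_fold (edge_data : List (List String)) :
    label_edges_classes_ordered edge_data =
      (edge_data.foldl pvStep PySem.Dict.empty).items := by
  unfold label_edges_classes_ordered
  congr 1
  exact congrFun (congrFun (congrArg List.foldl
    (funext fun d => funext fun e => pvStep_eq d e)) _) _

theorem pvGetD_fold (l : List (List String)) (d : PySem.Dict String (List (List String))) (c : String) :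
    (l.foldl pvStep d).getD c [] = d.getD c [] ++ (l.filter (fun e => pvLab e == c)).map pvNorm := by
  induction l generalizing d with
  | nil => simp
  | cons e l ih =>
    simp only [List.foldl_cons, List.filter_cons, ih]
    by_cases h : pvLab e = c
    · subst h
      simp [pvStep, PySem.Dict.getD_insert_self]
    · rw [pvStep, PySem.Dict.getD_insert_of_ne d _ [] (Ne.symm h)]
      simp [h]

theorem pvA_items (edge_data : List (List String)) :
    label_edges_classes_ordered edge_data =
      (PySem.Set.ofList (edge_data.map pvLab)).map
        (fun k => (k, (edge_data.filter (fun e => pvLab e == k)).map pvNorm)) := by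
  rw [pvA_eq_fold]
  have hstep : pvStep = fun (d : PySem.Dict String (List (List String))) x =>
      d.insert (pvLab x) ((fun d x => d.getD (pvLab x) [] ++ [pvNorm x]) d x) := rfl
  have hnd : (edge_data.foldl pvStep PySem.Dict.empty).keys.Nodup := by
    rw [hstep]
    exact PySem.Dict.nodup_keys_foldl_insert_key _ _ _ _ (by simp)
  rw [PySem.Dict.items_eq_map_keys _ hnd []]
  have hkeys : (edge_data.foldl pvStep PySem.Dict.empty).keys
      = PySem.Set.ofList (edge_data.map pvLab) := by
    rw [hstep, PySem.Dict.keys_foldl_insert_key, PySem.Dict.keys_empty,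
        PySem.Set.update_nil_left]
  rw [hkeys]
  apply List.map_congr_left
  intro k _
  rw [pvGetD_fold]
  simp

theorem pvB_items (edge_data : List (List String)) :
    label_edges_classes_ordered_alt edge_data =
      (PySem.Set.ofList (edge_data.map pvLab)).map
        (fun k => (k, (edge_data.filter (fun e => pvLab e == k)).map pvNorm)) := by
  show (PySem.List.dedup ((edge_data.map pvNorm).map (fun e => PySem.List.pyGetD e 1 ""))).map
      (fun lab => (lab, (edge_data.map pvNorm).filter (fun e => PySem.List.pyGetD e 1 "" == lab))) = _
  rw [PySem.List.dedup_eq_ofList, List.map_map]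
  have h1 : ((fun e => PySem.List.pyGetD e 1 "") ∘ pvNorm) = pvLab := rfl
  rw [h1]
  apply List.map_congr_left
  intro k _
  rw [List.filter_map]
  rfl

-- ===== VERDICT (by name: the statement is the Claim_ definition above) =====
theorem label_edges_classes_ordered_spec : Claim_equal_label_edges_classes_ordered := by
  intro edge_data _ _
  unfold Spec_label_edges_classes_ordered
  rw [pvA_items, pvB_items]
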